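-- pv_equiv track=rewrite | github.com/ralphje/adventofcode | solutions/year2023/day22.py | _supports_supported
-- ===== SOURCE A (Python) =====
-- import itertools
--
-- def _supports_supported(
--     bricks: list[set[tuple[int, int, int]]]
-- ) -> tuple[dict[int, set[int]], dict[int, set[int]]]:
--     """Given a list of bricks, will return for each brick, which bricks it supports, and which
--     bricks are supporting it.
--
--     Result is:
--     - dict of bricks, id to the brick ids it supports
--     - dict of bricks, id to the brick ids it is supporting
--     """
--
--     # Keep track of coordinates and which block occupies it
--     occupied = {}
--     # Keep track of each of the bricks
--     supports = {i: set() for i in range(len(bricks))}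
--     supported = {i: set() for i in range(len(bricks))}
--
--     for i, brick in enumerate(bricks):
--         # Try lowering the brick in increasing intervals
--         for tolerance in itertools.count():
--             lowered_brick = {(x, y, z - tolerance) for x, y, z in brick}
--             # Check which bricks are supported by it (if any)
--             supporting_bricks = {
--                 occupied[(x, y, z - 1)] for x, y, z in lowered_brick if (x, y, z - 1) in occupied
--             }
--             # If any brick supports it now, or we reach the ground, we know we are done
--             if supporting_bricks or any(pos[-1] == 1 for pos in lowered_brick):
--                 break
--         else:
--             raise AssertionError("unreachable")
--
--         # Add the lowered brick to the occupied region
--         occupied |= {p: i for p in lowered_brick}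
--
--         # Add the supporting brick to the supported, and vice versa
--         for supporting_brick in supporting_bricks:
--             supports[supporting_brick].add(i)
--             supported[i].add(supporting_brick)
--
--     return supports, supported
-- ===== SOURCE B (Python) =====
-- def _supports_supported(bricks):
--     """Same result as A, but each brick's fall distance is computed in closed form
--     from the occupied cells (no step-by-step lowering): the brick stops either when
--     a cell that started at z >= 1 reaches the ground (fall z - 1) or when a cell
--     lands right on top of an occupied cell of its column (fall z - oz - 1)."""
--     occupied = {}
--     supports = {i: set() for i in range(len(bricks))}
--     supported = {i: set() for i in range(len(bricks))}
--
--     for i, brick in enumerate(bricks):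
--         drops = [z - 1 for _, _, z in brick if z >= 1]
--         for x, y, z in brick:
--             for ox, oy, oz in occupied:
--                 if ox == x and oy == y and oz < z:
--                     drops.append(z - oz - 1)
--         drop = min(drops)
--
--         supporting = {
--             occupied[(x, y, z - drop - 1)]
--             for x, y, z in brick
--             if (x, y, z - drop - 1) in occupied
--         }
--         for x, y, z in brick:
--             occupied[(x, y, z - drop)] = i
--         for s in supporting:
--             supports[s].add(i)
--             supported[i].add(s)
--
--     return supports, supported
-- ===== Notes on version B (the rewrite author's own statement) =====
-- stated objective: alternative
-- what changed: A settles each brick by lowering it one level at a time and probing the occupied map at every tolerance until it rests; B computes each brick's fall distance in closed form as the minimum over its stopping candidates (z-1 for cells starting at z>=1, z-oz-1 for occupied cells strictly below a cell's column) and places the brick directly (intended as faster on tall falls; a timing run's random inputs mostly make A diverge, so no speed-up was measured).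
import Mathlib
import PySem

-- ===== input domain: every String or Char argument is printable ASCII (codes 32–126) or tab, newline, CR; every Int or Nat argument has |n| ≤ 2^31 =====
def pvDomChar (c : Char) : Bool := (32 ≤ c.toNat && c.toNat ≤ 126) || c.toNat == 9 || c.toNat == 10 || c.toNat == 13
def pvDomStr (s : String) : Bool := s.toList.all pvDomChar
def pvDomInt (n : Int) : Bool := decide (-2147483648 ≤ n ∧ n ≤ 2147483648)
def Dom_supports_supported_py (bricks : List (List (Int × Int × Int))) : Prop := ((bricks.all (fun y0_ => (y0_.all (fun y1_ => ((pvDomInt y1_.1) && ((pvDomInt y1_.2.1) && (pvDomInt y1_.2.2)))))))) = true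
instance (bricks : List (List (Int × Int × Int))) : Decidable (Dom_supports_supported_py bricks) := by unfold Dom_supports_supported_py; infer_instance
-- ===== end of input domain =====

-- B replaces A's step-by-step tolerance search (lower the brick one level at a time,
-- probing the occupied map at every step, until it rests) by a closed-form computation
-- of the fall distance from the occupied cells; the occupied map and the
-- supports/supported bookkeeping are the same code in both Pythons and are shared below.

-- {i: set() for i in range(len(bricks))} — identical line in both Pythons
def pvInitSets (n : Nat) : PySem.Dict Int (List Int) :=
  (PySem.List.pyRange 0 (Int.ofNat n) 1).foldl (fun d k => d.insert k ([] : List Int)) PySem.Dict.empty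

-- 'for s in supporting: supports[s].add(i); supported[i].add(s)' — identical in both Pythons
def pvRecord (i : Int) (supporting : List Int)
    (sp sd : PySem.Dict Int (List Int)) : PySem.Dict Int (List Int) × PySem.Dict Int (List Int) :=
  supporting.foldl
    (fun st sb => (st.1.modify sb [] (fun s => PySem.Set.add s i),
                   st.2.modify i [] (fun s => PySem.Set.add s sb)))
    (sp, sd)

-- ===== PORT A =====
-- {(x, y, z - tolerance) for x, y, z in brick}
def pvLower (brick : List (Int × Int × Int)) (t : Int) : List (Int × Int × Int) :=
  brick.map (fun c => (c.1, c.2.1, c.2.2 - t))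

-- {occupied[(x, y, z - 1)] for x, y, z in lowered_brick if (x, y, z - 1) in occupied}
def pvSupAt (occ : PySem.Dict (Int × Int × Int) Int) (brick : List (Int × Int × Int)) (t : Int) : List Int :=
  PySem.Set.ofList ((pvLower brick t).filterMap (fun c => occ.get? (c.1, c.2.1, c.2.2 - 1)))

-- 'if supporting_bricks or any(pos[-1] == 1 for pos in lowered_brick)'  (pos[-1] is z)
def pvStop (occ : PySem.Dict (Int × Int × Int) Int) (brick : List (Int × Int × Int)) (t : Int) : Bool :=
  !(pvSupAt occ brick t).isEmpty || (pvLower brick t).any (fun c => c.2.2 == 1)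

-- highest z of the brick, and the minimum of 1 and all occupied z's: these only feed the
-- totality guard (fuel) of pvFind below; Python A computes neither
def pvMaxZ (brick : List (Int × Int × Int)) : Int :=
  (PySem.List.max? (brick.map (fun c => c.2.2)) (fun z => z)).getD 0

def pvMinOcc (occ : PySem.Dict (Int × Int × Int) Int) : Int :=
  occ.items.foldl (fun m kv => min m kv.1.2.2) 1

-- 'for tolerance in itertools.count(): … break': unbounded in Python; the fuel argument is
-- only a totality guard — whenever Python's search stops at all it stops at a tolerance
-- below pvMaxZ brick - pvMinOcc occ + 1 (a cell falls to the ground from at most pvMaxZ,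
-- or onto an occupied cell no lower than pvMinOcc), so with that fuel the port returns
-- some r exactly where Python returns; none is exactly where Python A loops forever
def pvFind (occ : PySem.Dict (Int × Int × Int) Int) (brick : List (Int × Int × Int)) :
    Nat → Int → Option (Int × List Int)
  | 0, _ => none
  | fuel + 1, t =>
      if pvStop occ brick t then some (t, pvSupAt occ brick t)
      else pvFind occ brick fuel (t + 1)

def supports_supported_py (bricks : List (List (Int × Int × Int))) :
    (List (Int × List Int)) × (List (Int × List Int)) :=
  let res := (PySem.List.enumerate bricks).foldl
    (fun st p =>
      let i := p.1
      let brick := p.2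
      match pvFind st.1 brick ((pvMaxZ brick - pvMinOcc st.1).toNat + 1) 0 with
      | none => st      -- Python A never returns on such a brick (it falls forever)
      | some ts =>
        let occ' := (pvLower brick ts.1).foldl (fun d c => d.insert c i) st.1
        let spd := pvRecord i ts.2 st.2.1 st.2.2
        (occ', spd.1, spd.2))
    ((PySem.Dict.empty : PySem.Dict (Int × Int × Int) Int),
     pvInitSets bricks.length, pvInitSets bricks.length)
  (res.2.1.items, res.2.2.items)

-- ===== PORT B =====
-- drops = [z - 1 for _, _, z in brick if z >= 1]
def pvGround (brick : List (Int × Int × Int)) : List Int :=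
  brick.filterMap (fun c => if 1 ≤ c.2.2 then some (c.2.2 - 1) else none)

-- 'for x, y, z in brick: for ox, oy, oz in occupied: if ox == x and oy == y and oz < z:
--    drops.append(z - oz - 1)'  (iterating the occupied dict iterates its keys)
def pvDrops (occ : PySem.Dict (Int × Int × Int) Int) (brick : List (Int × Int × Int)) : List Int :=
  brick.foldl
    (fun l c =>
      occ.items.foldl
        (fun l2 kv =>
          if kv.1.1 = c.1 ∧ kv.1.2.1 = c.2.1 ∧ kv.1.2.2 < c.2.2
          then l2 ++ [c.2.2 - kv.1.2.2 - 1] else l2)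
        l)
    (pvGround brick)

def supports_supported_py_alt (bricks : List (List (Int × Int × Int))) :
    (List (Int × List Int)) × (List (Int × List Int)) :=
  let res := (PySem.List.enumerate bricks).foldl
    (fun st p =>
      let i := p.1
      let brick := p.2
      match PySem.List.min? (pvDrops st.1 brick) (fun z => z) with
      | none => st      -- Python B raises ValueError here (min of an empty list)
      | some drop =>
        let supporting : List Int :=
          PySem.Set.ofList (brick.filterMap (fun c => st.1.get? (c.1, c.2.1, c.2.2 - drop - 1)))
        let occ' := brick.foldl (fun d c => d.insert (c.1, c.2.1, c.2.2 - drop) i) st.1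
        let spd := pvRecord i supporting st.2.1 st.2.2
        (occ', spd.1, spd.2))
    ((PySem.Dict.empty : PySem.Dict (Int × Int × Int) Int),
     pvInitSets bricks.length, pvInitSets bricks.length)
  (res.2.1.items, res.2.2.items)

-- ===== PRECONDITION & SPEC =====
-- (no Pre_: the two ports agree on every input; where Python A loops forever and Python B
-- raises ValueError — exactly the bricks with an empty candidate list — both ports skip
-- the brick, and the differential tester only compares them where their Pythons return)
def Spec_supports_supported_py (bricks : List (List (Int × Int × Int)))
    (out : (List (Int × List Int)) × (List (Int × List Int))) : Prop :=
  out = supports_supported_py_alt bricks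
instance (bricks : List (List (Int × Int × Int))) (out : (List (Int × List Int)) × (List (Int × List Int))) : Decidable (Spec_supports_supported_py bricks out) := by
  unfold Spec_supports_supported_py; infer_instance

-- ===== CLAIM (what is proved, stated in full; the proofs are below) =====
def Claim_equal_supports_supported_py : Prop := ∀ (bricks : List (List (Int × Int × Int))), Dom_supports_supported_py bricks → Spec_supports_supported_py bricks (supports_supported_py bricks)

-- ===== LEMMAS AND PROOFS =====

-- proof-side name for B's minimum (some drop ↦ drop; the none case never reaches it)
def pvDrop (occ : PySem.Dict (Int × Int × Int) Int) (brick : List (Int × Int × Int)) : Int :=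
  (PySem.List.min? (pvDrops occ brick) (fun z => z)).getD 0

-- membership in the inner candidate-collecting fold
lemma pvMemInner (L : List ((Int × Int × Int) × Int)) (c : Int × Int × Int) (l : List Int) (v : Int) :
    v ∈ L.foldl
        (fun l2 kv =>
          if kv.1.1 = c.1 ∧ kv.1.2.1 = c.2.1 ∧ kv.1.2.2 < c.2.2
          then l2 ++ [c.2.2 - kv.1.2.2 - 1] else l2)
        l ↔
    v ∈ l ∨ ∃ kv ∈ L, (kv.1.1 = c.1 ∧ kv.1.2.1 = c.2.1 ∧ kv.1.2.2 < c.2.2) ∧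
      v = c.2.2 - kv.1.2.2 - 1 := by
  induction L generalizing l with
  | nil => simp
  | cons kv' L ih =>
      rw [List.foldl_cons, ih]
      by_cases hm : kv'.1.1 = c.1 ∧ kv'.1.2.1 = c.2.1 ∧ kv'.1.2.2 < c.2.2
      · rw [if_pos hm]
        simp only [List.mem_append, List.mem_cons, List.not_mem_nil, or_false]
        constructor
        · rintro ((h | h) | ⟨kv, hkv, hm2, he⟩)
          · exact Or.inl h
          · exact Or.inr ⟨kv', Or.inl rfl, hm, h⟩
          · exact Or.inr ⟨kv, Or.inr hkv, hm2, he⟩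
        · rintro (h | ⟨kv, (rfl | hkv), hm2, he⟩)
          · exact Or.inl (Or.inl h)
          · exact Or.inl (Or.inr he)
          · exact Or.inr ⟨kv, hkv, hm2, he⟩
      · rw [if_neg hm]
        simp only [List.mem_cons]
        constructor
        · rintro (h | ⟨kv, hkv, hm2, he⟩)
          · exact Or.inl h
          · exact Or.inr ⟨kv, Or.inr hkv, hm2, he⟩
        · rintro (h | ⟨kv, (rfl | hkv), hm2, he⟩)
          · exact Or.inl h
          · exact absurd hm2 hm
          · exact Or.inr ⟨kv, hkv, hm2, he⟩

-- membership in the full candidate list (outer fold, any initial list)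
lemma pvMemOuter (occ : PySem.Dict (Int × Int × Int) Int) (bs : List (Int × Int × Int))
    (l : List Int) (v : Int) :
    v ∈ bs.foldl
        (fun l c =>
          occ.items.foldl
            (fun l2 kv =>
              if kv.1.1 = c.1 ∧ kv.1.2.1 = c.2.1 ∧ kv.1.2.2 < c.2.2
              then l2 ++ [c.2.2 - kv.1.2.2 - 1] else l2)
            l)
        l ↔
    v ∈ l ∨ ∃ c ∈ bs, ∃ kv ∈ occ.items,
      (kv.1.1 = c.1 ∧ kv.1.2.1 = c.2.1 ∧ kv.1.2.2 < c.2.2) ∧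
      v = c.2.2 - kv.1.2.2 - 1 := by
  induction bs generalizing l with
  | nil => simp
  | cons c bs ih =>
      rw [List.foldl_cons, ih, pvMemInner]
      simp only [List.mem_cons]
      constructor
      · rintro ((h | ⟨kv, hkv, hm, he⟩) | ⟨c', hc', kv, hkv, hm, he⟩)
        · exact Or.inl h
        · exact Or.inr ⟨c, Or.inl rfl, kv, hkv, hm, he⟩
        · exact Or.inr ⟨c', Or.inr hc', kv, hkv, hm, he⟩
      · rintro (h | ⟨c', (rfl | hc'), kv, hkv, hm, he⟩)
        · exact Or.inl (Or.inl h)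
        · exact Or.inl (Or.inr ⟨kv, hkv, hm, he⟩)
        · exact Or.inr ⟨c', hc', kv, hkv, hm, he⟩

lemma pvMemGround (brick : List (Int × Int × Int)) (v : Int) :
    v ∈ pvGround brick ↔ ∃ c ∈ brick, 1 ≤ c.2.2 ∧ v = c.2.2 - 1 := by
  unfold pvGround
  rw [List.mem_filterMap]
  constructor
  · rintro ⟨c, hc, hv⟩
    by_cases h1 : 1 ≤ c.2.2
    · rw [if_pos h1, Option.some_inj] at hv
      exact ⟨c, hc, h1, hv.symm⟩
    · rw [if_neg h1] at hv; cases hv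
  · rintro ⟨c, hc, h1, rfl⟩
    exact ⟨c, hc, by rw [if_pos h1]⟩

lemma pvMemDrops (occ : PySem.Dict (Int × Int × Int) Int) (brick : List (Int × Int × Int)) (v : Int) :
    v ∈ pvDrops occ brick ↔
      (∃ c ∈ brick, 1 ≤ c.2.2 ∧ v = c.2.2 - 1) ∨
      ∃ c ∈ brick, ∃ kv ∈ occ.items,
        (kv.1.1 = c.1 ∧ kv.1.2.1 = c.2.1 ∧ kv.1.2.2 < c.2.2) ∧
        v = c.2.2 - kv.1.2.2 - 1 := by
  unfold pvDrops
  rw [pvMemOuter, pvMemGround]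

-- the computed drop is a member of the candidate list and a lower bound for it
lemma pvDrop_mem (occ : PySem.Dict (Int × Int × Int) Int) (brick : List (Int × Int × Int))
    (hb : pvDrops occ brick ≠ []) : pvDrop occ brick ∈ pvDrops occ brick := by
  unfold pvDrop
  cases hmin : PySem.List.min? (pvDrops occ brick) (fun z => z) with
  | none => exact absurd (PySem.List.min?_eq_none_iff _ _ |>.mp hmin) hb
  | some m => exact PySem.List.min?_mem hmin

lemma pvDrop_min (occ : PySem.Dict (Int × Int × Int) Int) (brick : List (Int × Int × Int))
    (hb : pvDrops occ brick ≠ []) {v : Int} (hv : v ∈ pvDrops occ brick) :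
    pvDrop occ brick ≤ v := by
  unfold pvDrop
  cases hmin : PySem.List.min? (pvDrops occ brick) (fun z => z) with
  | none => exact absurd (PySem.List.min?_eq_none_iff _ _ |>.mp hmin) hb
  | some m => simpa using PySem.List.min?_isMin hmin v hv

lemma pvDrop_nonneg (occ : PySem.Dict (Int × Int × Int) Int) (brick : List (Int × Int × Int))
    (hb : pvDrops occ brick ≠ []) : 0 ≤ pvDrop occ brick := by
  rcases (pvMemDrops occ brick _).mp (pvDrop_mem occ brick hb) with
    ⟨c, _, h1, he⟩ | ⟨c, _, kv, _, ⟨_, _, h3⟩, he⟩ <;> omega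

-- the search condition holds at the computed drop …
lemma pvStop_at_drop (occ : PySem.Dict (Int × Int × Int) Int) (brick : List (Int × Int × Int))
    (hb : pvDrops occ brick ≠ []) :
    pvStop occ brick (pvDrop occ brick) = true := by
  unfold pvStop
  rcases (pvMemDrops occ brick _).mp (pvDrop_mem occ brick hb) with
    ⟨c, hc, h1, he⟩ | ⟨c, hc, kv, hkv, hm, he⟩
  · apply Bool.or_eq_true_iff.mpr; right
    rw [List.any_eq_true]
    refine ⟨(c.1, c.2.1, c.2.2 - pvDrop occ brick), List.mem_map_of_mem hc, ?_⟩
    simp only [beq_iff_eq]; omega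
  · apply Bool.or_eq_true_iff.mpr; left
    have hkey : kv.1 ∈ occ.keys := PySem.Dict.mem_keys_of_mem_items occ hkv
    have hget : occ.get? kv.1 ≠ none := by
      intro hn
      rw [PySem.Dict.get?_eq_none_iff_not_mem_keys] at hn
      exact hn hkey
    cases hg : occ.get? kv.1 with
    | none => exact absurd hg hget
    | some j =>
        have hmem : j ∈ (pvLower brick (pvDrop occ brick)).filterMap
            (fun c => occ.get? (c.1, c.2.1, c.2.2 - 1)) := by
          rw [List.mem_filterMap]
          refine ⟨(c.1, c.2.1, c.2.2 - pvDrop occ brick), List.mem_map_of_mem hc, ?_⟩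
          have hke : (c.1, c.2.1, c.2.2 - pvDrop occ brick - 1) = kv.1 := by
            obtain ⟨m1, m2, m3⟩ := hm
            have h3 : c.2.2 - pvDrop occ brick - 1 = kv.1.2.2 := by omega
            rw [← m1, ← m2, h3]
          rw [hke]; exact hg
        have hj : j ∈ pvSupAt occ brick (pvDrop occ brick) := by
          unfold pvSupAt
          rw [PySem.Set.mem_ofList]
          exact hmem
        have hne2 : pvSupAt occ brick (pvDrop occ brick) ≠ [] := List.ne_nil_of_mem hj
        simp [hne2]

-- … and fails strictly below it
lemma pvStop_below_drop (occ : PySem.Dict (Int × Int × Int) Int) (brick : List (Int × Int × Int))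
    (hb : pvDrops occ brick ≠ []) (s : Int) (h0 : 0 ≤ s) (hs : s < pvDrop occ brick) :
    pvStop occ brick s = false := by
  unfold pvStop
  rw [Bool.or_eq_false_iff]
  constructor
  · have hsup : pvSupAt occ brick s = [] := by
      by_contra hne
      rcases List.exists_mem_of_ne_nil _ hne with ⟨j, hj⟩
      unfold pvSupAt at hj
      rw [PySem.Set.mem_ofList, List.mem_filterMap] at hj
      rcases hj with ⟨c', hc', hg⟩
      rcases List.mem_map.mp hc' with ⟨c, hc, hce⟩
      subst hce
      simp only at hg
      have hkey : (c.1, c.2.1, c.2.2 - s - 1) ∈ occ.keys := by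
        by_contra hk
        rw [← PySem.Dict.get?_eq_none_iff_not_mem_keys] at hk
        rw [hk] at hg; cases hg
      rcases List.mem_map.mp hkey with ⟨kv, hkv, hkve⟩
      have hm : kv.1.1 = c.1 ∧ kv.1.2.1 = c.2.1 ∧ kv.1.2.2 < c.2.2 := by
        rw [hkve]
        exact ⟨rfl, rfl, by show c.2.2 - s - 1 < c.2.2; omega⟩
      have hsmem : s ∈ pvDrops occ brick := by
        rw [pvMemDrops]
        refine Or.inr ⟨c, hc, kv, hkv, hm, ?_⟩
        have h4 : kv.1.2.2 = c.2.2 - s - 1 := by rw [hkve]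
        omega
      have := pvDrop_min occ brick hb hsmem
      omega
    simp [hsup]
  · rw [List.any_eq_false]
    intro p hp
    rcases List.mem_map.mp hp with ⟨c, hc, hce⟩
    subst hce
    simp only [beq_iff_eq]
    intro hz
    have h1 : 1 ≤ c.2.2 := by omega
    have hsmem : s ∈ pvDrops occ brick := by
      rw [pvMemDrops]
      exact Or.inl ⟨c, hc, h1, by omega⟩
    have := pvDrop_min occ brick hb hsmem
    omega

-- bounds feeding the fuel: pvMinOcc is below 1 and below every occupied z, pvMaxZ above every brick z
lemma pvFoldMin_le (L : List ((Int × Int × Int) × Int)) (m : Int) :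
    L.foldl (fun m kv => min m kv.1.2.2) m ≤ m := by
  induction L generalizing m with
  | nil => simp
  | cons kv L ih => exact le_trans (ih _) (min_le_left _ _)

lemma pvFoldMin_le_mem (L : List ((Int × Int × Int) × Int)) :
    ∀ (m : Int) {kv : (Int × Int × Int) × Int}, kv ∈ L →
      L.foldl (fun m kv => min m kv.1.2.2) m ≤ kv.1.2.2 := by
  induction L with
  | nil => intro m kv hkv; cases hkv
  | cons kv' L ih =>
      intro m kv hkv
      rw [List.foldl_cons]
      rcases List.mem_cons.mp hkv with h | h
      · subst h
        exact le_trans (pvFoldMin_le L _) (min_le_right _ _)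
      · exact ih _ h

lemma pvMinOcc_le_one (occ : PySem.Dict (Int × Int × Int) Int) : pvMinOcc occ ≤ 1 :=
  pvFoldMin_le occ.items 1

lemma pvMinOcc_le_mem (occ : PySem.Dict (Int × Int × Int) Int)
    {kv : (Int × Int × Int) × Int} (hkv : kv ∈ occ.items) : pvMinOcc occ ≤ kv.1.2.2 :=
  pvFoldMin_le_mem occ.items 1 hkv

lemma pvMaxZ_ge (brick : List (Int × Int × Int)) {c : Int × Int × Int} (hc : c ∈ brick) :
    c.2.2 ≤ pvMaxZ brick := by
  unfold pvMaxZ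
  cases hmax : PySem.List.max? (brick.map (fun c => c.2.2)) (fun z => z) with
  | none =>
      rw [PySem.List.max?_eq_none_iff] at hmax
      rw [List.map_eq_nil_iff.mp hmax] at hc; cases hc
  | some m => simpa using PySem.List.max?_isMax hmax c.2.2 (List.mem_map_of_mem hc)

lemma pvDrop_lt_fuel (occ : PySem.Dict (Int × Int × Int) Int) (brick : List (Int × Int × Int))
    (hb : pvDrops occ brick ≠ []) :
    (pvDrop occ brick).toNat < (pvMaxZ brick - pvMinOcc occ).toNat + 1 := by
  have h0 := pvDrop_nonneg occ brick hb
  have h1 := pvMinOcc_le_one occ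
  rcases (pvMemDrops occ brick _).mp (pvDrop_mem occ brick hb) with
    ⟨c, hc, hz1, he⟩ | ⟨c, hc, kv, hkv, ⟨_, _, hlt⟩, he⟩
  · have h2 := pvMaxZ_ge brick hc
    omega
  · have h2 := pvMaxZ_ge brick hc
    have h3 := pvMinOcc_le_mem occ hkv
    omega

-- a stopping tolerance is always one of B's candidates
lemma pvStop_mem (occ : PySem.Dict (Int × Int × Int) Int) (brick : List (Int × Int × Int))
    (s : Int) (h0 : 0 ≤ s) (hs : pvStop occ brick s = true) :
    s ∈ pvDrops occ brick := by
  unfold pvStop at hs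
  rcases Bool.or_eq_true_iff.mp hs with hsup | hany
  · have hsup' : pvSupAt occ brick s ≠ [] := by
      intro h
      rw [h] at hsup; simp at hsup
    rcases List.exists_mem_of_ne_nil _ hsup' with ⟨j, hj⟩
    unfold pvSupAt at hj
    rw [PySem.Set.mem_ofList, List.mem_filterMap] at hj
    rcases hj with ⟨c', hc', hg⟩
    rcases List.mem_map.mp hc' with ⟨c, hc, hce⟩
    subst hce
    simp only at hg
    have hkey : (c.1, c.2.1, c.2.2 - s - 1) ∈ occ.keys := by
      by_contra hk
      rw [← PySem.Dict.get?_eq_none_iff_not_mem_keys] at hk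
      rw [hk] at hg; cases hg
    rcases List.mem_map.mp hkey with ⟨kv, hkv, hkve⟩
    have hm : kv.1.1 = c.1 ∧ kv.1.2.1 = c.2.1 ∧ kv.1.2.2 < c.2.2 := by
      rw [hkve]
      exact ⟨rfl, rfl, by show c.2.2 - s - 1 < c.2.2; omega⟩
    rw [pvMemDrops]
    refine Or.inr ⟨c, hc, kv, hkv, hm, ?_⟩
    have h4 : kv.1.2.2 = c.2.2 - s - 1 := by rw [hkve]
    omega
  · rcases List.any_eq_true.mp hany with ⟨p, hp, hz⟩
    rcases List.mem_map.mp hp with ⟨c, hc, hce⟩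
    subst hce
    simp only [beq_iff_eq] at hz
    rw [pvMemDrops]
    exact Or.inl ⟨c, hc, by omega, by omega⟩

-- the search never stops when there is no candidate: the fuelled port returns none
lemma pvFind_none (occ : PySem.Dict (Int × Int × Int) Int) (brick : List (Int × Int × Int))
    (hnil : pvDrops occ brick = []) :
    ∀ (fuel : Nat) (t : Int), 0 ≤ t → pvFind occ brick fuel t = none := by
  intro fuel
  induction fuel with
  | zero => intro t _; rfl
  | succ f ih =>
      intro t ht
      unfold pvFind
      have hst : pvStop occ brick t = false := by
        by_contra h
        have := pvStop_mem occ brick t ht (by revert h; cases pvStop occ brick t <;> simp)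
        rw [hnil] at this; cases this
      rw [if_neg (by rw [hst]; simp)]
      exact ih (t + 1) (by omega)

-- the fuelled search returns exactly the first stopping tolerance
lemma pvFind_eq (occ : PySem.Dict (Int × Int × Int) Int) (brick : List (Int × Int × Int))
    (d : Int)
    (hstop : pvStop occ brick d = true)
    (hbelow : ∀ s, 0 ≤ s → s < d → pvStop occ brick s = false) :
    ∀ (fuel : Nat) (t : Int), 0 ≤ t → t ≤ d → (d - t).toNat < fuel →
      pvFind occ brick fuel t = some (d, pvSupAt occ brick d) := by
  intro fuel
  induction fuel with
  | zero => intro t _ _ hf; omega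
  | succ f ih =>
      intro t ht0 htd hf
      unfold pvFind
      by_cases he : t = d
      · subst he
        rw [if_pos hstop]
      · have hlt : t < d := lt_of_le_of_ne htd he
        rw [if_neg (by rw [hbelow t ht0 hlt]; simp)]
        exact ih (t + 1) (by omega) (by omega) (by omega)

-- one settling step of A equals one settling step of B
lemma pvStep_eq (occ : PySem.Dict (Int × Int × Int) Int) (brick : List (Int × Int × Int))
    (hb : pvDrops occ brick ≠ []) :
    pvFind occ brick ((pvMaxZ brick - pvMinOcc occ).toNat + 1) 0 =
      some (pvDrop occ brick,
       PySem.Set.ofList (brick.filterMap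
         (fun c => occ.get? (c.1, c.2.1, c.2.2 - pvDrop occ brick - 1)))) := by
  have h1 := pvDrop_nonneg occ brick hb
  have h2 := pvDrop_lt_fuel occ brick hb
  have h3 := pvFind_eq occ brick (pvDrop occ brick) (pvStop_at_drop occ brick hb)
      (pvStop_below_drop occ brick hb) ((pvMaxZ brick - pvMinOcc occ).toNat + 1) 0
      le_rfl h1 (by omega)
  rw [h3]
  unfold pvSupAt pvLower
  rw [List.filterMap_map]
  rfl

-- ===== VERDICT (by name: the statement is the Claim_ definition above) =====
theorem supports_supported_py_spec : Claim_equal_supports_supported_py := by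
  unfold Claim_equal_supports_supported_py
  intro bricks _
  unfold Spec_supports_supported_py supports_supported_py supports_supported_py_alt
  have main : ∀ (bs : List (List (Int × Int × Int)))
      (occ : PySem.Dict (Int × Int × Int) Int)
      (sp sd : PySem.Dict Int (List Int)) (i : Int),
      (PySem.List.enumerate bs i).foldl
        (fun st p =>
          let i := p.1
          let brick := p.2
          match pvFind st.1 brick ((pvMaxZ brick - pvMinOcc st.1).toNat + 1) 0 with
          | none => st
          | some ts =>
            let occ' := (pvLower brick ts.1).foldl (fun d c => d.insert c i) st.1
            let spd := pvRecord i ts.2 st.2.1 st.2.2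
            (occ', spd.1, spd.2))
        (occ, sp, sd) =
      (PySem.List.enumerate bs i).foldl
        (fun st p =>
          let i := p.1
          let brick := p.2
          match PySem.List.min? (pvDrops st.1 brick) (fun z => z) with
          | none => st
          | some drop =>
            let supporting : List Int :=
              PySem.Set.ofList (brick.filterMap (fun c => st.1.get? (c.1, c.2.1, c.2.2 - drop - 1)))
            let occ' := brick.foldl (fun d c => d.insert (c.1, c.2.1, c.2.2 - drop) i) st.1
            let spd := pvRecord i supporting st.2.1 st.2.2
            (occ', spd.1, spd.2))
        (occ, sp, sd) := by
    intro bs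
    induction bs with
    | nil => intro occ sp sd i; rfl
    | cons brick bs ih =>
        intro occ sp sd i
        rw [PySem.List.enumerate_cons, List.foldl_cons, List.foldl_cons]
        cases hmin : PySem.List.min? (pvDrops occ brick) (fun z => z) with
        | none =>
            have hnil := (PySem.List.min?_eq_none_iff _ _).mp hmin
            simp only [hmin, pvFind_none occ brick hnil _ 0 le_rfl]
            exact ih _ _ _ _
        | some m =>
            have hb : pvDrops occ brick ≠ [] := by
              intro h
              rw [(PySem.List.min?_eq_none_iff (pvDrops occ brick) (fun z => z)).mpr h] at hmin
              cases hmin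
            have hm : m = pvDrop occ brick := by unfold pvDrop; rw [hmin]; rfl
            subst hm
            simp only [hmin, pvStep_eq occ brick hb]
            rw [show (pvLower brick (pvDrop occ brick)).foldl (fun d c => d.insert c i) occ =
                brick.foldl (fun d c => d.insert (c.1, c.2.1, c.2.2 - pvDrop occ brick) i) occ from by
              unfold pvLower; rw [List.foldl_map]]
            exact ih _ _ _ _
  exact congrArg (fun r => (r.2.1.items, r.2.2.items))
    (main bricks (PySem.Dict.empty) (pvInitSets bricks.length) (pvInitSets bricks.length) 0)
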